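-- pv_equiv track=rewrite | github.com/hfhfn/AI_Resources | scripts/distribute_files.py | is_pattern_rule
-- ===== SOURCE A (Python) =====
-- def is_pattern_rule(rule):
--     """Returns True if the rule contains unescaped wildcards (* or ?)."""
--     i = 0
--     while i < len(rule):
--         if rule[i] == '\\' and i + 1 < len(rule):
--             i += 2  # Skip escaped character
--         elif rule[i] in ('*', '?'):
--             return True
--         else:
--             i += 1
--     return False
-- ===== SOURCE B (Python) =====
-- import re
--
-- def is_pattern_rule(rule):
--     """Returns True if the rule contains unescaped wildcards (* or ?)."""
--     cleaned = re.sub(r'\\.', '', rule, flags=re.DOTALL)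
--     return '*' in cleaned or '?' in cleaned
-- ===== Notes on version B (the rewrite author's own statement) =====
-- stated objective: idiomatic
-- what changed: Replaces A's stateful index-based escape scanner with a transform-then-test decomposition: one regex pass strips every escape pair, then a plain membership test looks for a surviving wildcard.
import Mathlib
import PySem

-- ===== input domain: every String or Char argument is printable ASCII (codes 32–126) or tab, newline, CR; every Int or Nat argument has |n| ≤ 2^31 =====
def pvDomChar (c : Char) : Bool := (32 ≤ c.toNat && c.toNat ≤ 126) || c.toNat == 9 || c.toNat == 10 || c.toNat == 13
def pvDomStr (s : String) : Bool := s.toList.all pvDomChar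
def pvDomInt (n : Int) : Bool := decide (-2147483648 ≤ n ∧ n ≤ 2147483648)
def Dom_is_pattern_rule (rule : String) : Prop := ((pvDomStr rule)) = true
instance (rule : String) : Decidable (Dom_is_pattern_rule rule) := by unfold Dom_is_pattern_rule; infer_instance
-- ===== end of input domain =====

-- B replaces A's index-based escape scanner with strip-escapes-then-membership (idiomatic regex decomposition); proved equal on all strings.


-- ===== PORT A =====
-- A's while loop over index i, transliterated as structural recursion on the
-- remaining characters (the loop's state): the two-char case is 'i+1 < len'.
def isPatternLoop : List Char → Bool
  | [] => false
  | [c] => c = '*' ∨ c = '?'                 -- i+1 < len is false, so only the wildcard test applies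
  | c :: d :: rest =>
      if c = '\\' then isPatternLoop rest    -- skip escaped character (i += 2)
      else if c = '*' ∨ c = '?' then true
      else isPatternLoop (d :: rest)         -- i += 1

def is_pattern_rule (rule : String) : Bool := isPatternLoop rule.toList

-- ===== PORT B =====
-- re.sub(r'\\.', '', rule, flags=re.DOTALL): left-to-right, drop every backslash+any-char pair.
def stripEscapes : List Char → List Char
  | [] => []
  | [c] => [c]
  | c :: d :: rest =>
      if c = '\\' then stripEscapes rest
      else c :: stripEscapes (d :: rest)

def is_pattern_rule_alt (rule : String) : Bool :=
  let cleaned := stripEscapes rule.toList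
  cleaned.contains '*' || cleaned.contains '?'

-- ===== PRECONDITION & SPEC =====
def Spec_is_pattern_rule (rule : String) (out : Bool) : Prop := out = is_pattern_rule_alt rule
instance (rule : String) (out : Bool) : Decidable (Spec_is_pattern_rule rule out) := by unfold Spec_is_pattern_rule; infer_instance

-- ===== CLAIM (what is proved, stated in full; the proofs are below) =====
def Claim_equal_is_pattern_rule : Prop := ∀ (rule : String), Dom_is_pattern_rule rule → Spec_is_pattern_rule rule (is_pattern_rule rule)

-- ===== LEMMAS AND PROOFS =====
theorem isPatternLoop_eq_stripEscapes (l : List Char) :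
    isPatternLoop l = ((stripEscapes l).contains '*' || (stripEscapes l).contains '?') := by
  fun_induction isPatternLoop l <;> simp_all [stripEscapes]
  case case2 c => simp [eq_comm]
  case case4 c d rest h1 h => rcases h with h | h <;> simp [h]
  case case5 c d rest h1 h ih => simp [Ne.symm h.1, Ne.symm h.2]

-- ===== VERDICT (by name: the statement is the Claim_ definition above) =====
theorem is_pattern_rule_spec : Claim_equal_is_pattern_rule := by
  intro rule _
  unfold Spec_is_pattern_rule is_pattern_rule is_pattern_rule_alt
  exact isPatternLoop_eq_stripEscapes rule.toList
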